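-- pv_equiv track=rewrite | github.com/sashamarkov/codewars | 6-kyu/ping-pong-1/ping-pong-1.py | ping_pong
-- ===== SOURCE A (Python) =====
-- def ping_pong(sounds):
--     who_serve = None
--     last_hit = None
--     pong = 0
--     ping = 0
--     for h in sounds.split("-"):
--         if h in ["ping", "pong"]:
--             last_hit = h
--             if not who_serve:
--                 who_serve = h
--         else:
--             if who_serve == "ping" and last_hit == "pong":
--                 ping += 1
--             elif who_serve == "pong" and last_hit == "ping":
--                 pong += 1
--             who_serve = None
--     if ping > pong:
--         return "ping"
--     if pong > ping:
--         return "pong"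
--     return "pong" if last_hit == "ping" else "ping"
-- ===== SOURCE B (Python) =====
-- def ping_pong(sounds):
--     # Run-based scan: consume maximal runs of hit tokens and fault tokens,
--     # scoring at most once per fault run (serve = first hit of the preceding run).
--     toks = sounds.split("-")
--     n = len(toks)
--     ping = pong = 0
--     last_hit = None
--     i = 0
--     while i < n:
--         if toks[i] in ("ping", "pong"):
--             serve = toks[i]
--             while i < n and toks[i] in ("ping", "pong"):
--                 last_hit = toks[i]
--                 i += 1
--             if i < n:  # a fault run follows: score once, then skip it
--                 if serve == "ping" and last_hit == "pong":
--                     ping += 1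
--                 elif serve == "pong" and last_hit == "ping":
--                     pong += 1
--                 i += 1
--                 while i < n and toks[i] not in ("ping", "pong"):
--                     i += 1
--         else:
--             while i < n and toks[i] not in ("ping", "pong"):
--                 i += 1
--     if ping > pong:
--         return "ping"
--     if pong > ping:
--         return "pong"
--     return "pong" if last_hit == "ping" else "ping"
-- ===== Notes on version B (the rewrite author's own statement) =====
-- stated objective: alternative
-- what changed: B replaces A's per-token state machine (who_serve/last_hit updated on every token) by a run-based scan: it consumes each maximal run of hit tokens (serve = first, last_hit = last) and each maximal run of fault tokens (scoring at most once per fault run), with inner while loops advancing an index.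
import Mathlib
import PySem

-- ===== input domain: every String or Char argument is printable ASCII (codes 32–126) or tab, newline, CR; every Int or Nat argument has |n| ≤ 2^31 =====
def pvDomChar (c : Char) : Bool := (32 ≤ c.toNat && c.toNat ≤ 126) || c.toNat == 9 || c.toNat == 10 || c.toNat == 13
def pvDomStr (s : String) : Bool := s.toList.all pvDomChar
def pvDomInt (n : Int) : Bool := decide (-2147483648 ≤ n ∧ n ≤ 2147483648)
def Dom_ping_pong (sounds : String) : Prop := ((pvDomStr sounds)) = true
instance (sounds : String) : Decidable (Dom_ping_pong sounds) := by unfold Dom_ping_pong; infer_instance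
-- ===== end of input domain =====

-- B replaces A's per-token loop by a run-based scan (one score per fault run); objective: alternative decomposition, return value only.

-- ===== PORT A =====
-- state: (who_serve, last_hit, ping, pong)
def pvStepA (st : Option String × Option String × Int × Int) (h : String) :
    Option String × Option String × Int × Int :=
  let (who, last, ping, pong) := st
  if h == "ping" || h == "pong" then
    (if who.isNone then some h else who, some h, ping, pong)
  else
    if who == some "ping" && last == some "pong" then (none, last, ping + 1, pong)
    else if who == some "pong" && last == some "ping" then (none, last, ping, pong + 1)
    else (none, last, ping, pong)

def ping_pong (sounds : String) : String :=
  let st := ((PySem.Chars.splitOn sounds.toList (↑"-".toList) : List (List Char)).map String.ofList).foldl pvStepA (none, none, 0, 0)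
  let last := st.2.1
  let ping := st.2.2.1
  let pong := st.2.2.2
  if ping > pong then "ping"
  else if pong > ping then "pong"
  else if last == some "ping" then "pong" else "ping"

-- ===== PORT B =====
def pvHit (s : String) : Bool := s == "ping" || s == "pong"

-- run-based scan: returns (last_hit, ping, pong)
def pvLoopB : List String → Option String → Int → Int → Option String × Int × Int
  | [], last, ping, pong => (last, ping, pong)
  | t :: ts, last, ping, pong =>
    if pvHit t then
      -- inner while over the hit run: last_hit = last token of the run, serve = t
      let lastHit := (ts.takeWhile pvHit).getLastD t
      match _hrest : ts.dropWhile pvHit with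
      | [] => (some lastHit, ping, pong)
      | _ :: rs =>
        let pq : Int × Int :=
          if t == "ping" && lastHit == "pong" then (ping + 1, pong)
          else if t == "pong" && lastHit == "ping" then (ping, pong + 1)
          else (ping, pong)
        pvLoopB (rs.dropWhile (fun s => !pvHit s)) (some lastHit) pq.1 pq.2
    else
      pvLoopB (ts.dropWhile (fun s => !pvHit s)) last ping pong
termination_by ts _ _ _ => ts.length
decreasing_by
  · have h1 : (rs.dropWhile (fun s => !pvHit s)).length ≤ rs.length :=
      List.length_dropWhile_le _ _
    have h2 : (ts.dropWhile pvHit).length ≤ ts.length := List.length_dropWhile_le _ _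
    simp only [_hrest, List.length_cons] at h2
    simp only [List.length_cons]
    omega
  · have h1 : (ts.dropWhile (fun s => !pvHit s)).length ≤ ts.length :=
      List.length_dropWhile_le _ _
    simp only [List.length_cons]; omega

def ping_pong_alt (sounds : String) : String :=
  let st := pvLoopB ((PySem.Chars.splitOn sounds.toList (↑"-".toList) : List (List Char)).map String.ofList) none 0 0
  let last := st.1
  let ping := st.2.1
  let pong := st.2.2
  if ping > pong then "ping"
  else if pong > ping then "pong"
  else if last == some "ping" then "pong" else "ping"

-- ===== PRECONDITION & SPEC =====
def Spec_ping_pong (sounds : String) (out : String) : Prop := out = ping_pong_alt sounds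
instance (sounds : String) (out : String) : Decidable (Spec_ping_pong sounds out) := by unfold Spec_ping_pong; infer_instance

-- ===== CLAIM (what is proved, stated in full; the proofs are below) =====
def Claim_equal_ping_pong : Prop := ∀ (sounds : String), Dom_ping_pong sounds → Spec_ping_pong sounds (ping_pong sounds)

-- ===== LEMMAS AND PROOFS =====

-- with who_serve = none, A's loop is a no-op on fault tokens
lemma pvSkipFaults (ts : List String) (l : Option String) (p q : Int) :
    ts.foldl pvStepA (none, l, p, q)
      = (ts.dropWhile (fun s => !pvHit s)).foldl pvStepA (none, l, p, q) := by
  induction ts with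
  | nil => rfl
  | cons t ts ih =>
    by_cases ht : pvHit t
    · simp [ht]
    · have hstep : pvStepA (none, l, p, q) t = (none, l, p, q) := by
        simp [pvStepA, pvHit] at *
        simp [ht.1, ht.2]
      simp [ht, List.foldl_cons, hstep, ih]

-- with who_serve set, A's loop over a hit run just advances last_hit to the run's last token
lemma pvRun (ts : List String) (s t : String) (p q : Int) :
    ts.foldl pvStepA (some s, some t, p, q)
      = (ts.dropWhile pvHit).foldl pvStepA
          (some s, some ((ts.takeWhile pvHit).getLastD t), p, q) := by
  induction ts generalizing t with
  | nil => rfl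
  | cons u ts ih =>
    by_cases hu : pvHit u
    · have hstep : pvStepA (some s, some t, p, q) u = (some s, some u, p, q) := by
        simp [pvStepA, pvHit] at *
        rcases hu with hu | hu <;> simp [hu]
      have hdw : (u :: ts).dropWhile pvHit = ts.dropWhile pvHit := by simp [hu]
      have htw : (u :: ts).takeWhile pvHit = u :: ts.takeWhile pvHit := by simp [hu]
      rw [List.foldl_cons, hstep, ih u, hdw, htw, List.getLastD_cons]
    · simp [hu]

-- A's scoring step on a fault token, with who_serve and last_hit set
lemma pvScoreStep (t lastHit : String) (p q : Int) (f : String) (hf : pvHit f = false) :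
    pvStepA (some t, some lastHit, p, q) f =
      (none, some lastHit,
        (if t == "ping" && lastHit == "pong" then ((p + 1 : Int), q)
         else if t == "pong" && lastHit == "ping" then (p, (q + 1 : Int))
         else (p, q)).1,
        (if t == "ping" && lastHit == "pong" then ((p + 1 : Int), q)
         else if t == "pong" && lastHit == "ping" then (p, (q + 1 : Int))
         else (p, q)).2) := by
  simp [pvStepA, pvHit] at hf ⊢
  simp [hf.1, hf.2]
  split_ifs <;> simp_all

lemma pvMain : ∀ (n : Nat) (ts : List String), ts.length ≤ n → ∀ (l : Option String) (p q : Int),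
    (ts.foldl pvStepA (none, l, p, q)).2 = pvLoopB ts l p q := by
  intro n
  induction n with
  | zero =>
    intro ts hts l p q
    have : ts = [] := List.eq_nil_of_length_eq_zero (Nat.le_zero.mp hts)
    subst this; simp [pvLoopB]
  | succ n ih =>
    intro ts hts l p q
    match ts with
    | [] => simp [pvLoopB]
    | t :: ts =>
      by_cases ht : pvHit t
      · have hstep : pvStepA (none, l, p, q) t = (some t, some t, p, q) := by
          simp [pvStepA, pvHit] at *
          rcases ht with ht | ht <;> simp [ht]
        rw [List.foldl_cons, hstep, pvRun]
        rw [pvLoopB]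
        simp only [ht, if_true]
        split
        next hrest =>
          rw [hrest]
          rfl
        next f rs hrest =>
          have hne : ts.dropWhile pvHit ≠ [] := by simp [hrest]
          have hf : pvHit f = false := by
            have hh := List.head_dropWhile_not pvHit (l := ts) hne
            simp only [hrest, List.head_cons] at hh
            simpa using hh
          have hlen2 : (rs.dropWhile (fun s => !pvHit s)).length ≤ n := by
            have h1 : (rs.dropWhile (fun s => !pvHit s)).length ≤ rs.length :=
              List.length_dropWhile_le _ _
            have h2 : (ts.dropWhile pvHit).length ≤ ts.length := List.length_dropWhile_le _ _
            rw [hrest] at h2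
            simp only [List.length_cons] at h2 hts
            omega
          rw [hrest, List.foldl_cons,
            pvScoreStep t ((ts.takeWhile pvHit).getLastD t) p q f hf,
            pvSkipFaults, ih _ hlen2]
      · have hstep : pvStepA (none, l, p, q) t = (none, l, p, q) := by
          simp [pvStepA, pvHit] at *
          simp [ht.1, ht.2]
        have hlen2 : (ts.dropWhile (fun s => !pvHit s)).length ≤ n := by
          have h1 : (ts.dropWhile (fun s => !pvHit s)).length ≤ ts.length :=
            List.length_dropWhile_le _ _
          simp only [List.length_cons] at hts
          omega
        rw [List.foldl_cons, hstep, pvSkipFaults, ih _ hlen2]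
        rw [pvLoopB]
        simp [ht]

-- ===== VERDICT (by name: the statement is the Claim_ definition above) =====
theorem ping_pong_spec : Claim_equal_ping_pong := by
  intro sounds _
  unfold Spec_ping_pong ping_pong ping_pong_alt
  have h := pvMain ((PySem.Chars.splitOn sounds.toList ("-".toList)).map String.ofList).length
    ((PySem.Chars.splitOn sounds.toList ("-".toList)).map String.ofList) le_rfl none 0 0
  simp only [h]
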